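-- pv_equiv track=rewrite | github.com/blackcoffepls/python | ej3.py | validate_discount_code
-- ===== SOURCE A (Python) =====
-- _AVAILABLE_DISCOUNT_CODES = ["Primavera2021", "Verano2021",
-- "Navidad2x1", "heladoFrozen"]
--
-- def validate_discount_code(discount_code):
--     is_valid = False
--     index = 0
--     while (is_valid == False) and (index < len(_AVAILABLE_DISCOUNT_CODES)):
--         total = 0
--
--         for char in "".join(dict.fromkeys(discount_code)):
--             if not char in _AVAILABLE_DISCOUNT_CODES[index]:
--                 total += 1
--                 if total>3: break
--
--         if total < 3:
--             for char in "".join(dict.fromkeys(_AVAILABLE_DISCOUNT_CODES[index])):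
--                 if not char in discount_code:
--                     total += 1
--                     if total >3: break
--
--         if total < 3:
--             is_valid = True
--         else:
--             index += 1
--
--     return (is_valid)
-- ===== SOURCE B (Python) =====
-- _AVAILABLE_DISCOUNT_CODES = ["Primavera2021", "Verano2021",
-- "Navidad2x1", "heladoFrozen"]
--
-- def validate_discount_code(discount_code):
--     return any(len(set(discount_code) ^ set(code)) < 3
--                for code in _AVAILABLE_DISCOUNT_CODES)
-- ===== Notes on version B (the rewrite author's own statement) =====
-- stated objective: simpler
-- what changed: A's while loop over codes with two nested char loops, a break-at->3 accumulator and manual dedup is replaced by a one-liner: accept iff the symmetric difference of the character sets has size < 3 for some available code.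
import Mathlib
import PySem

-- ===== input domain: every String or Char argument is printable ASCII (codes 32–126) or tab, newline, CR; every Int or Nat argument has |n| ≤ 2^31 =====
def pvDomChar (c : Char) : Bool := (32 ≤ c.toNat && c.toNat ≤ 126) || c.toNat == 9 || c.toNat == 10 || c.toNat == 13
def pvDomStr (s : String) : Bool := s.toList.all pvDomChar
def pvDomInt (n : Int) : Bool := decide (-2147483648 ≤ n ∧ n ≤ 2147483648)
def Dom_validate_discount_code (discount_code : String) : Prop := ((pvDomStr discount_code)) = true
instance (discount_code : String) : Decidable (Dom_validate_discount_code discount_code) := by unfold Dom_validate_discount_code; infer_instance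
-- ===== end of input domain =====

-- B replaces A's nested char loops / break accumulator by one symmetric-set-difference test per code (objective: simpler).

-- ===== PORT A =====
def pvAvailableCodes : List String := ["Primavera2021", "Verano2021", "Navidad2x1", "heladoFrozen"]

-- 'for char in chars: if not char in code: total += 1; if total > 3: break'
-- ('char in code' on a single character is exactly list membership of the char)
def pvLoop1 (code : List Char) : List Char → Int → Int
  | [], total => total
  | c :: rest, total =>
    if !(code.contains c) then
      if total + 1 > 3 then total + 1 else pvLoop1 code rest (total + 1)
    else pvLoop1 code rest total

-- one iteration of the while body: the final value of 'total' for this index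
def pvCheck (dcl cl : List Char) : Int :=
  let total := pvLoop1 cl (PySem.List.dedup dcl) 0
  if total < 3 then pvLoop1 dcl (PySem.List.dedup cl) total else total

-- the while loop: stop with True as soon as total < 3, else move to the next index
def pvWhile (dcl : List Char) : List String → Bool
  | [] => false
  | code :: rest => if pvCheck dcl code.toList < 3 then true else pvWhile dcl rest

def validate_discount_code (discount_code : String) : Bool :=
  pvWhile discount_code.toList pvAvailableCodes

-- ===== PORT B =====
def validate_discount_code_alt (discount_code : String) : Bool :=
  pvAvailableCodes.any (fun code =>
    PySem.Set.len (PySem.Set.symmDiff (PySem.Set.ofList discount_code.toList)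
                                      (PySem.Set.ofList code.toList)) < 3)

-- ===== PRECONDITION & SPEC =====
def Spec_validate_discount_code (discount_code : String) (out : Bool) : Prop := out = validate_discount_code_alt discount_code
instance (discount_code : String) (out : Bool) : Decidable (Spec_validate_discount_code discount_code out) := by unfold Spec_validate_discount_code; infer_instance

-- ===== CLAIM (what is proved, stated in full; the proofs are below) =====
def Claim_equal_validate_discount_code : Prop := ∀ (discount_code : String), Dom_validate_discount_code discount_code → Spec_validate_discount_code discount_code (validate_discount_code discount_code)

-- ===== LEMMAS AND PROOFS =====

-- the break-at->3 loop computes min (total + #misses) 4 whenever total ≤ 3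
theorem pvLoop1_eq_min (code : List Char) (xs : List Char) :
    ∀ t : Int, t ≤ 3 →
      pvLoop1 code xs t = min (t + ((xs.filter (fun c => !(code.contains c))).length : Int)) 4 := by
  induction xs with
  | nil => intro t ht; simp [pvLoop1]; omega
  | cons c rest ih =>
    intro t ht
    by_cases h : c ∈ code
    · simp [pvLoop1, h, ih t ht]
    · by_cases h4 : t + 1 > 3
      · simp [pvLoop1, h, h4]
        push_cast
        omega
      · simp [pvLoop1, h, h4, ih (t + 1) (by omega), List.filter_cons]
        push_cast
        omega

-- the two filters count with the same predicate whether the reference is deduped or not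
theorem filter_contains_ofList (xs ys : List Char) :
    xs.filter (fun c => !((PySem.Set.ofList ys).contains c)) = xs.filter (fun c => !(ys.contains c)) := by
  apply List.filter_congr
  intro c _
  have : (PySem.Set.ofList ys).contains c = ys.contains c := by
    simp [PySem.Set.contains_eq_listContains, PySem.Set.mem_ofList]
  rw [this]

-- one while-body iteration accepts iff the symmetric difference of the char sets is < 3
theorem pvCheck_lt_iff (dcl cl : List Char) :
    (pvCheck dcl cl < 3) ↔
      PySem.Set.len (PySem.Set.symmDiff (PySem.Set.ofList dcl) (PySem.Set.ofList cl)) < 3 := by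
  have hdiff : PySem.Set.symmDiff (PySem.Set.ofList dcl) (PySem.Set.ofList cl)
      = (PySem.Set.ofList dcl).filter (fun c => !((PySem.Set.ofList cl).contains c))
        ++ (PySem.Set.ofList cl).filter (fun c => !((PySem.Set.ofList dcl).contains c)) := rfl
  set c1 : Int := (((PySem.List.dedup dcl).filter (fun c => !(cl.contains c))).length : Int) with hc1
  set c2 : Int := (((PySem.List.dedup cl).filter (fun c => !(dcl.contains c))).length : Int) with hc2
  have hlen : PySem.Set.len (PySem.Set.symmDiff (PySem.Set.ofList dcl) (PySem.Set.ofList cl)) = c1 + c2 := by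
    rw [hdiff]
    show ((_ ++ _ : List Char).length : Int) = _
    rw [List.length_append, filter_contains_ofList, filter_contains_ofList]
    simp [hc1, hc2, PySem.List.dedup_eq_ofList]
  rw [hlen]
  have h1 : pvLoop1 cl (PySem.List.dedup dcl) 0 = min c1 4 := by
    rw [pvLoop1_eq_min cl (PySem.List.dedup dcl) 0 (by norm_num), zero_add, hc1]
  unfold pvCheck
  rw [h1]
  by_cases hlt : min c1 4 < 3
  · have hc1lt : c1 < 3 := by omega
    have h2 := pvLoop1_eq_min dcl (PySem.List.dedup cl) (min c1 4) (by omega)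
    rw [if_pos hlt, h2, ← hc2]
    have hc1nonneg : 0 ≤ c1 := by positivity
    have hc2nonneg : 0 ≤ c2 := by positivity
    omega
  · rw [if_neg hlt]
    have hc1nonneg : 0 ≤ c1 := by positivity
    have hc2nonneg : 0 ≤ c2 := by positivity
    constructor
    · intro h; omega
    · intro h; omega

theorem pvWhile_eq_any (dcl : List Char) (codes : List String) :
    pvWhile dcl codes = codes.any (fun code =>
      PySem.Set.len (PySem.Set.symmDiff (PySem.Set.ofList dcl) (PySem.Set.ofList code.toList)) < 3) := by
  induction codes with
  | nil => rfl
  | cons code rest ih =>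
    by_cases h : pvCheck dcl code.toList < 3
    · simp only [pvWhile, if_pos h, List.any_cons,
        decide_eq_true ((pvCheck_lt_iff dcl code.toList).mp h), Bool.true_or]
    · have hd : decide (PySem.Set.len (PySem.Set.symmDiff (PySem.Set.ofList dcl) (PySem.Set.ofList code.toList)) < 3) = false :=
        decide_eq_false (fun hx => h ((pvCheck_lt_iff dcl code.toList).mpr hx))
      simp only [pvWhile, if_neg h, List.any_cons, hd, Bool.false_or, ih]

-- ===== VERDICT (by name: the statement is the Claim_ definition above) =====
theorem validate_discount_code_spec : Claim_equal_validate_discount_code := by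
  intro dc _
  unfold Spec_validate_discount_code validate_discount_code validate_discount_code_alt
  exact pvWhile_eq_any dc.toList pvAvailableCodes
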